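-- pv_equiv track=rewrite | github.com/repoze/repoze.squeeze | repoze/squeeze/processor.py | get_slices_ordered_by_size
-- ===== SOURCE A (Python) =====
-- def get_slices_ordered_by_size(items):
--     slices = []
--     length = len(items)
--     for i in range(length):
--         for j in range(i+1, length+1):
--             slices.append(tuple(items[i:j]))
--     slices.sort(key=lambda item: len(item))
--     return slices
-- ===== SOURCE B (Python) =====
-- def get_slices_ordered_by_size(items):
--     n = len(items)
--     slices = []
--     for L in range(1, n + 1):
--         for i in range(n - L + 1):
--             slices.append(tuple(items[i:i + L]))
--     return slices
-- ===== Notes on version B (the rewrite author's own statement) =====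
-- stated objective: simpler
-- what changed: B generates the subslices directly in length-major order (outer loop over length, inner over start index), so the sort disappears entirely; stability of A's sort makes the orders coincide.
import Mathlib
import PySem

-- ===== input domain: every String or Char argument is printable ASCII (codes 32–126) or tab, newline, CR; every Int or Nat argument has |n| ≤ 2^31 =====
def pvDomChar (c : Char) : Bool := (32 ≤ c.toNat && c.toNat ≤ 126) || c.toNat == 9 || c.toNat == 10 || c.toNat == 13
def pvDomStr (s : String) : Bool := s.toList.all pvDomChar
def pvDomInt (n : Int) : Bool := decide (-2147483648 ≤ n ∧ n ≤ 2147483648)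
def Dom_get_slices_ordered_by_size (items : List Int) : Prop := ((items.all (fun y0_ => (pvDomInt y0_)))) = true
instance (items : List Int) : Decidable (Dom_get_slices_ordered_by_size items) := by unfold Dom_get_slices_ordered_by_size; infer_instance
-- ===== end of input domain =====

-- B generates the subslices directly in length-major order, so A's stable sort disappears; same output, no sort.

-- ===== PORT A =====
def get_slices_ordered_by_size (items : List Int) : List (List Int) :=
  let slices : List (List Int) := []
  let length : Int := PySem.List.len items
  let slices := (PySem.List.pyRange 0 length 1).foldl (fun slices i =>
      (PySem.List.pyRange (i+1) (length+1) 1).foldl (fun slices j =>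
        slices ++ [PySem.List.slice items (some i) (some j)]) slices) slices
  PySem.List.sorted slices (fun item => PySem.List.len item)

-- ===== PORT B =====
def get_slices_ordered_by_size_alt (items : List Int) : List (List Int) :=
  let n : Int := PySem.List.len items
  (PySem.List.pyRange 1 (n+1) 1).foldl (fun slices L =>
    (PySem.List.pyRange 0 (n - L + 1) 1).foldl (fun slices i =>
      slices ++ [PySem.List.slice items (some i) (some (i + L))]) slices) []

-- ===== PRECONDITION & SPEC =====
def Spec_get_slices_ordered_by_size (items : List Int) (out : List (List Int)) : Prop := out = get_slices_ordered_by_size_alt items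
instance (items : List Int) (out : List (List Int)) : Decidable (Spec_get_slices_ordered_by_size items out) := by unfold Spec_get_slices_ordered_by_size; infer_instance

-- ===== CLAIM (what is proved, stated in full; the proofs are below) =====
def Claim_equal_get_slices_ordered_by_size : Prop := ∀ (items : List Int), Dom_get_slices_ordered_by_size items → Spec_get_slices_ordered_by_size items (get_slices_ordered_by_size items)

-- ===== LEMMAS AND PROOFS =====

-- slice of xs starting at i with length L
def pvSl (xs : List Int) (i L : Nat) : List Int := (xs.drop i).take L
-- the first c slices of length L, in start-index order
def pvCol (xs : List Int) (L c : Nat) : List (List Int) := (List.range c).map (fun i => pvSl xs i L)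
-- how many slices of length L are present after rows 0..m-1 and, within row m, lengths 1..t
def pvCnt (n m t L : Nat) : Nat := if L ≤ t then min (m+1) (n-L+1) else min m (n-L+1)
-- the accumulator of A's insertion sort, grouped by length
def pvState (xs : List Int) (m t : Nat) : List (List Int) :=
  (List.range xs.length).flatMap (fun k => pvCol xs (k+1) (pvCnt xs.length m t (k+1)))
def pvIns (x : List Int) (acc : List (List Int)) : List (List Int) :=
  PySem.List.insertBy (fun a b => decide (PySem.List.len a < PySem.List.len b)) x acc

theorem pvSl_length (xs : List Int) (i L : Nat) (h : i + L ≤ xs.length) :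
    (pvSl xs i L).length = L := by
  simp [pvSl]; omega

theorem insertBy_append_left {α : Type} (before : α → α → Bool) (x : α) (as bs : List α)
    (h : ∀ a ∈ as, before x a = false) :
    PySem.List.insertBy before x (as ++ bs) = as ++ PySem.List.insertBy before x bs := by
  induction as with
  | nil => simp
  | cons a as ih =>
      simp only [List.cons_append, PySem.List.insertBy]
      rw [h a (by simp), ih (fun a ha => h a (by simp [ha]))]
      simp

theorem insertBy_all_before {α : Type} (before : α → α → Bool) (x : α) (ys : List α)
    (h : ∀ y ∈ ys, before x y = true) :
    PySem.List.insertBy before x ys = x :: ys := by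
  cases ys with
  | nil => rfl
  | cons y ys => simp [PySem.List.insertBy, h y (by simp)]

theorem pvFlatMap_range_congr {b : Type} (n : Nat) (f g : Nat → List b)
    (h : ∀ k, k < n → f k = g k) :
    (List.range n).flatMap f = (List.range n).flatMap g := by
  rw [List.flatMap_def, List.flatMap_def]
  exact congrArg List.flatten (List.map_congr_left (fun k hk => h k (List.mem_range.mp hk)))

theorem pvIns_state (xs : List Int) (m t : Nat) (hm : m < xs.length) (ht : t < xs.length - m) :
    pvIns (pvSl xs m (t+1)) (pvState xs m t) = pvState xs m (t+1) := by
  have hlx : PySem.List.len (pvSl xs m (t+1)) = ((t+1 : Nat) : Int) := by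
    rw [PySem.List.len_eq, pvSl_length xs m (t+1) (by omega)]
  have hcol : ∀ (m' t' k : Nat), k < xs.length →
      ∀ a ∈ pvCol xs (k+1) (pvCnt xs.length m' t' (k+1)), PySem.List.len a = ((k+1:Nat):Int) := by
    intro m' t' k hk a ha
    obtain ⟨i, hi, rfl⟩ := List.mem_map.mp ha
    rw [List.mem_range] at hi
    have hcnt : pvCnt xs.length m' t' (k+1) ≤ xs.length - (k+1) + 1 := by
      unfold pvCnt; split_ifs <;> omega
    rw [PySem.List.len_eq, pvSl_length xs i (k+1) (by omega)]
  have hsplit : List.range xs.length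
      = List.range (t+1) ++ (List.range (xs.length - (t+1))).map (fun j => (t+1) + j) := by
    rw [← List.range_add]
    congr 1
    omega
  unfold pvState pvIns
  rw [hsplit, List.flatMap_append, List.flatMap_append]
  rw [insertBy_append_left _ _ _ _ (by
    intro a ha
    obtain ⟨k, hk, hak⟩ := List.mem_flatMap.mp ha
    rw [List.mem_range] at hk
    have hlen := hcol m t k (by omega) a hak
    simp only [hlx, hlen, decide_eq_false_iff_not]
    omega)]
  rw [insertBy_all_before _ _ _ (by
    intro a ha
    obtain ⟨k, hk, hak⟩ := List.mem_flatMap.mp ha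
    obtain ⟨j, hj, rfl⟩ := List.mem_map.mp hk
    rw [List.mem_range] at hj
    have hlen := hcol m t ((t+1)+j) (by omega) a hak
    simp only [hlx, hlen, decide_eq_true_eq]
    omega)]
  have hsuffix : ((List.range (xs.length - (t+1))).map (fun j => (t+1) + j)).flatMap
        (fun k => pvCol xs (k+1) (pvCnt xs.length m (t+1) (k+1)))
      = ((List.range (xs.length - (t+1))).map (fun j => (t+1) + j)).flatMap
        (fun k => pvCol xs (k+1) (pvCnt xs.length m t (k+1))) := by
    rw [List.flatMap_map, List.flatMap_map]
    apply pvFlatMap_range_congr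
    intro j hj
    have hc : pvCnt xs.length m (t+1) ((t+1)+j+1) = pvCnt xs.length m t ((t+1)+j+1) := by
      unfold pvCnt; split_ifs <;> omega
    rw [hc]
  rw [hsuffix, List.range_succ, List.flatMap_append, List.flatMap_append]
  simp only [List.flatMap_cons, List.flatMap_nil, List.append_nil]
  have hQ : (List.range t).flatMap (fun k => pvCol xs (k+1) (pvCnt xs.length m (t+1) (k+1)))
      = (List.range t).flatMap (fun k => pvCol xs (k+1) (pvCnt xs.length m t (k+1))) := by
    apply pvFlatMap_range_congr
    intro k hk
    have hc : pvCnt xs.length m (t+1) (k+1) = pvCnt xs.length m t (k+1) := by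
      unfold pvCnt; split_ifs <;> omega
    rw [hc]
  have hlast : pvCol xs (t+1) (pvCnt xs.length m (t+1) (t+1))
      = pvCol xs (t+1) (pvCnt xs.length m t (t+1)) ++ [pvSl xs m (t+1)] := by
    have h1 : pvCnt xs.length m (t+1) (t+1) = m+1 := by unfold pvCnt; split_ifs <;> omega
    have h2 : pvCnt xs.length m t (t+1) = m := by unfold pvCnt; split_ifs <;> omega
    rw [h1, h2]
    unfold pvCol
    rw [List.range_succ]
    simp
  rw [hQ, hlast]
  simp [List.append_assoc]

theorem pvState_step (xs : List Int) (m : Nat) (hm : m < xs.length) :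
    pvState xs m (xs.length - m) = pvState xs (m+1) 0 := by
  unfold pvState
  apply pvFlatMap_range_congr
  intro k hk
  have hc : pvCnt xs.length m (xs.length - m) (k+1) = pvCnt xs.length (m+1) 0 (k+1) := by
    unfold pvCnt; split_ifs <;> omega
  rw [hc]

theorem pvState_zero (xs : List Int) : pvState xs 0 0 = [] := by
  simp [pvState, pvCnt, pvCol]

theorem pvRow_fold (xs : List Int) (m : Nat) (hm : m < xs.length) :
    ∀ (d t : Nat), t + d = xs.length - m →
      List.foldl (fun acc x => pvIns x acc) (pvState xs m t)
        ((List.range d).map (fun j => pvSl xs m (t+j+1))) = pvState xs m (xs.length - m) := by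
  intro d
  induction d with
  | zero =>
      intro t h
      simp only [List.range_zero, List.map_nil, List.foldl_nil]
      rw [show t = xs.length - m from by omega]
  | succ d ih =>
      intro t h
      simp only [List.range_succ_eq_map, List.map_cons, List.map_map, List.foldl_cons,
        Function.comp_def, Nat.add_zero]
      rw [pvIns_state xs m t hm (by omega)]
      have hmap : (List.range d).map (fun j => pvSl xs m (t + (j+1) + 1))
          = (List.range d).map (fun j => pvSl xs m ((t+1) + j + 1)) :=
        List.map_congr_left (fun j _ => by
          rw [show t + (j+1) + 1 = (t+1) + j + 1 from by omega])
      rw [show (fun j => pvSl xs m (t + Nat.succ j + 1)) = (fun j => pvSl xs m (t + (j+1) + 1)) from rfl,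
        hmap]
      exact ih (t+1) (by omega)

theorem pvOuter_fold (xs : List Int) :
    ∀ (m : Nat), m ≤ xs.length →
      List.foldl (fun acc x => pvIns x acc) []
        ((List.range m).flatMap (fun i => (List.range (xs.length - i)).map (fun k => pvSl xs i (k+1))))
      = pvState xs m 0 := by
  intro m
  induction m with
  | zero => intro _; simpa using (pvState_zero xs).symm
  | succ m ih =>
      intro hm
      rw [List.range_succ, List.flatMap_append, List.foldl_append, ih (by omega)]
      simp only [List.flatMap_cons, List.flatMap_nil, List.append_nil]
      have hrow := pvRow_fold xs m (by omega) (xs.length - m) 0 (by omega)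
      simp only [Nat.zero_add] at hrow
      rw [hrow]
      exact pvState_step xs m (by omega)

theorem pvFlatMap_singleton {a b : Type} (f : a → b) (l : List a) :
    l.flatMap (fun x => [f x]) = l.map f := by
  induction l with
  | nil => rfl
  | cons x l ih => simp [ih]

theorem portA_eq (xs : List Int) :
    get_slices_ordered_by_size xs
      = PySem.List.sorted
          ((List.range xs.length).flatMap (fun i => (List.range (xs.length - i)).map (fun k => pvSl xs i (k+1))))
          (fun item => PySem.List.len item) := by
  unfold get_slices_ordered_by_size
  simp only [PySem.List.len_eq, PySem.List.foldl_append_eq_flatMap, List.nil_append]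
  congr 1
  rw [PySem.List.pyRange_zero_nat, List.flatMap_map]
  apply pvFlatMap_range_congr
  intro i hi
  rw [PySem.List.pyRange_one,
    show (((xs.length:Int)+1) - ((i:Int)+1)).toNat = xs.length - i from by omega,
    List.flatMap_map]
  rw [pvFlatMap_singleton (fun k : Nat => PySem.List.slice xs (some (i:Int)) (some ((i:Int)+1+(k:Int))))]
  apply List.map_congr_left
  intro k _
  rw [show ((i:Int)+1+(k:Int)) = (i:Int) + ((k+1 : Nat):Int) from by push_cast; ring,
    PySem.List.slice_natCast_add]
  rfl

theorem portB_eq (xs : List Int) :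
    get_slices_ordered_by_size_alt xs
      = (List.range xs.length).flatMap (fun k => pvCol xs (k+1) (xs.length - k)) := by
  unfold get_slices_ordered_by_size_alt
  simp only [PySem.List.len_eq, PySem.List.foldl_append_eq_flatMap, List.nil_append]
  rw [PySem.List.pyRange_one,
    show (((xs.length:Int)+1) - 1).toNat = xs.length from by omega,
    List.flatMap_map]
  apply pvFlatMap_range_congr
  intro k hk
  have h2 : ((xs.length:Int) - (1+(k:Int)) + 1) = ((xs.length - k : Nat) : Int) := by omega
  rw [h2, PySem.List.pyRange_zero_nat, List.flatMap_map]
  rw [pvFlatMap_singleton (fun i : Nat => PySem.List.slice xs (some (i:Int)) (some ((i:Int) + (1+(k:Int)))))]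
  unfold pvCol
  apply List.map_congr_left
  intro i _
  rw [show ((1:Int)+(k:Int)) = ((k+1 : Nat):Int) from by push_cast; ring,
    PySem.List.slice_natCast_add]
  rfl

theorem pvState_final (xs : List Int) :
    pvState xs xs.length 0 = (List.range xs.length).flatMap (fun k => pvCol xs (k+1) (xs.length - k)) := by
  unfold pvState
  apply pvFlatMap_range_congr
  intro k hk
  have hc : pvCnt xs.length xs.length 0 (k+1) = xs.length - k := by
    unfold pvCnt; split_ifs <;> omega
  rw [hc]

-- ===== VERDICT (by name: the statement is the Claim_ definition above) =====
theorem get_slices_ordered_by_size_spec : Claim_equal_get_slices_ordered_by_size := by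
  intro items _
  show get_slices_ordered_by_size items = get_slices_ordered_by_size_alt items
  rw [portA_eq, portB_eq, PySem.List.sorted_eq_foldl_insertBy, ← pvState_final]
  exact pvOuter_fold items items.length le_rfl
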